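-- pv_equiv track=rewrite | github.com/KatherLab/llmaixweb | backend/src/utils/evaluation.py | _calculate_confusion_matrices
-- ===== SOURCE A (Python) =====
-- from typing import Any, Dict, List, Optional
--
-- def _calculate_confusion_matrices(detailed_metrics: List[Dict]) -> Dict:
--     """Calculate confusion matrices for categorical fields."""
--     # This is a simplified example and may need to be adapted
--     # based on the actual requirements and data structure
--     confusion_matrices = {}
--     for metric in detailed_metrics:
--         field_name = metric["field_name"]
--         if field_name not in confusion_matrices:
--             confusion_matrices[field_name] = {}
--         gt_value = metric["ground_truth_value"]
--         pred_value = metric["predicted_value"]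
--         if gt_value not in confusion_matrices[field_name]:
--             confusion_matrices[field_name][gt_value] = {}
--         if pred_value not in confusion_matrices[field_name][gt_value]:
--             confusion_matrices[field_name][gt_value][pred_value] = 0
--         confusion_matrices[field_name][gt_value][pred_value] += 1
--     return confusion_matrices
-- ===== SOURCE B (Python) =====
-- def _calculate_confusion_matrices(detailed_metrics):
--     """Calculate confusion matrices for categorical fields."""
--     # Flat tally first: count each (field, gt, pred) triple in one pass.
--     counts = {}
--     for metric in detailed_metrics:
--         t = (
--             metric["field_name"],
--             metric["ground_truth_value"],
--             metric["predicted_value"],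
--         )
--         counts[t] = counts.get(t, 0) + 1
--     # Then reshape the flat tally into the nested structure.
--     result = {}
--     for (field, gt, pred), c in counts.items():
--         result.setdefault(field, {}).setdefault(gt, {})[pred] = c
--     return result
-- ===== Notes on version B (the rewrite author's own statement) =====
-- stated objective: idiomatic
-- what changed: A maintains the nested dict incrementally with three membership checks per metric; B makes one flat pass tallying (field, gt, pred) triples in a single counter dict and then reshapes the tally into the nested dict in a second pass.
import Mathlib
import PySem

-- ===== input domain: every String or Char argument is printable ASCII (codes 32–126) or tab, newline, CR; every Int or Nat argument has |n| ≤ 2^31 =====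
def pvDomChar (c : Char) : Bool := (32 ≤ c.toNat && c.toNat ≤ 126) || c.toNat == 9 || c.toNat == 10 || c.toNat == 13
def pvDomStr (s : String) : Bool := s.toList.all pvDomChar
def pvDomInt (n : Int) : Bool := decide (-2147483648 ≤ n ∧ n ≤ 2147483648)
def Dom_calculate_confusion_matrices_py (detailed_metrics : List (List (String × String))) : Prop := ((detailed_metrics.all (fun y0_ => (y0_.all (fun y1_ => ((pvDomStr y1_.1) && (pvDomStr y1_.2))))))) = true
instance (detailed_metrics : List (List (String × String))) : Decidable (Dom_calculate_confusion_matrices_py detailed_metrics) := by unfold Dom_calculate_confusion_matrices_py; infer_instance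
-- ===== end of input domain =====

-- B replaces A's incremental maintenance of the nested dict by a flat one-pass tally keyed by
-- the (field, gt, pred) triple followed by a reshape of the tally into the nested dict (alternative).

-- metric["k"]: Python dict lookup (first match); Pre_ guarantees the key is present, so the default is never used
def pvLookup (m : List (String × String)) (k : String) : String :=
  (PySem.Dict.mk m).getD k ""

-- ===== PORT A =====
def calculate_confusion_matrices_py (detailed_metrics : List (List (String × String))) : List (String × List (String × List (String × Int))) :=
  let cms := detailed_metrics.foldl (fun cm m =>
    let f := pvLookup m "field_name"
    let cm := if cm.contains f then cm else cm.insert f PySem.Dict.empty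
    let g := pvLookup m "ground_truth_value"
    let p := pvLookup m "predicted_value"
    let d1 := cm.getD f PySem.Dict.empty
    let d1 := if d1.contains g then d1 else d1.insert g PySem.Dict.empty
    let d2 := d1.getD g PySem.Dict.empty
    let d2 := if d2.contains p then d2 else d2.insert p 0
    let d2 := d2.insert p (d2.getD p 0 + 1)
    cm.insert f (d1.insert g d2)) PySem.Dict.empty
  cms.items.map (fun fd => (fd.1, fd.2.items.map (fun gd => (gd.1, gd.2.items))))

-- ===== PORT B =====
def calculate_confusion_matrices_py_alt (detailed_metrics : List (List (String × String))) : List (String × List (String × List (String × Int))) :=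
  let counts := detailed_metrics.foldl (fun d m =>
    let t := (pvLookup m "field_name", pvLookup m "ground_truth_value", pvLookup m "predicted_value")
    d.insert t (d.getD t 0 + 1)) PySem.Dict.empty
  let result := counts.items.foldl (fun r x =>
    let r := r.setdefault x.1.1 PySem.Dict.empty
    let d1 := r.getD x.1.1 PySem.Dict.empty
    let d1 := d1.setdefault x.1.2.1 PySem.Dict.empty
    let d2 := d1.getD x.1.2.1 PySem.Dict.empty
    let d2 := d2.insert x.1.2.2 x.2
    r.insert x.1.1 (d1.insert x.1.2.1 d2)) PySem.Dict.empty
  result.items.map (fun fd => (fd.1, fd.2.items.map (fun gd => (gd.1, gd.2.items))))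

-- ===== PRECONDITION & SPEC =====
-- Pre_ excludes exactly the metrics missing one of the three keys, on which Python A raises KeyError
-- (B raises KeyError there too).
def Pre_calculate_confusion_matrices_py (detailed_metrics : List (List (String × String))) : Prop :=
  (detailed_metrics.all (fun m =>
    m.any (fun kv => kv.1 == "field_name") &&
    m.any (fun kv => kv.1 == "ground_truth_value") &&
    m.any (fun kv => kv.1 == "predicted_value"))) = true
instance (detailed_metrics : List (List (String × String))) : Decidable (Pre_calculate_confusion_matrices_py detailed_metrics) := by unfold Pre_calculate_confusion_matrices_py; infer_instance

def pvWitness_calculate_confusion_matrices_py : (List (List (String × String))) :=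
  [[("field_name", "a"), ("ground_truth_value", "x"), ("predicted_value", "y")],
   [("field_name", "a"), ("ground_truth_value", "x"), ("predicted_value", "y")]]

def Spec_calculate_confusion_matrices_py (detailed_metrics : List (List (String × String))) (out : List (String × List (String × List (String × Int)))) : Prop := out = calculate_confusion_matrices_py_alt detailed_metrics
instance (detailed_metrics : List (List (String × String))) (out : List (String × List (String × List (String × Int)))) : Decidable (Spec_calculate_confusion_matrices_py detailed_metrics out) := by unfold Spec_calculate_confusion_matrices_py; infer_instance

-- ===== CLAIM (what is proved, stated in full; the proofs are below) =====
def Claim_equal_calculate_confusion_matrices_py : Prop := ∀ (detailed_metrics : List (List (String × String))), Dom_calculate_confusion_matrices_py detailed_metrics → Pre_calculate_confusion_matrices_py detailed_metrics → Spec_calculate_confusion_matrices_py detailed_metrics (calculate_confusion_matrices_py detailed_metrics)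

-- ===== LEMMAS AND PROOFS =====

-- the (field, gt, pred) triple of a metric, and clean one-step forms of the two loop bodies
def pvTri (m : List (String × String)) : String × String × String :=
  (pvLookup m "field_name", pvLookup m "ground_truth_value", pvLookup m "predicted_value")

def pvF2 (d2 : PySem.Dict String Int) (p : String) : PySem.Dict String Int :=
  d2.insert p (d2.getD p 0 + 1)
def pvF1 (d1 : PySem.Dict String (PySem.Dict String Int)) (gp : String × String) :
    PySem.Dict String (PySem.Dict String Int) :=
  d1.insert gp.1 (pvF2 (d1.getD gp.1 PySem.Dict.empty) gp.2)
def pvF0 (cm : PySem.Dict String (PySem.Dict String (PySem.Dict String Int)))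
    (t : String × String × String) :
    PySem.Dict String (PySem.Dict String (PySem.Dict String Int)) :=
  cm.insert t.1 (pvF1 (cm.getD t.1 PySem.Dict.empty) t.2)
def pvG1 (d1 : PySem.Dict String (PySem.Dict String Int)) (x : (String × String × String) × Int) :
    PySem.Dict String (PySem.Dict String Int) :=
  d1.insert x.1.2.1 ((d1.getD x.1.2.1 PySem.Dict.empty).insert x.1.2.2 x.2)
def pvG0 (r : PySem.Dict String (PySem.Dict String (PySem.Dict String Int)))
    (x : (String × String × String) × Int) :
    PySem.Dict String (PySem.Dict String (PySem.Dict String Int)) :=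
  r.insert x.1.1 (pvG1 (r.getD x.1.1 PySem.Dict.empty) x)

def pvToOut (cm : PySem.Dict String (PySem.Dict String (PySem.Dict String Int))) :
    List (String × List (String × List (String × Int))) :=
  cm.items.map (fun fd => (fd.1, fd.2.items.map (fun gd => (gd.1, gd.2.items))))

lemma cond_insert_getD {κ ν : Type} [BEq κ] [LawfulBEq κ] (d : PySem.Dict κ ν) (k : κ) (e : ν) :
    (if d.contains k then d else d.insert k e).getD k e = d.getD k e := by
  by_cases h : d.contains k
  · rw [if_pos h]
  · rw [if_neg h, PySem.Dict.getD_insert_self,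
      PySem.Dict.getD_of_not_contains d e (by simpa using h)]

lemma cond_insert_insert {κ ν : Type} [BEq κ] [LawfulBEq κ] (d : PySem.Dict κ ν) (k : κ) (e v : ν) :
    (if d.contains k then d else d.insert k e).insert k v = d.insert k v := by
  by_cases h : d.contains k
  · rw [if_pos h]
  · rw [if_neg h, PySem.Dict.insert_insert_self]

lemma setdefault_insert {κ ν : Type} [BEq κ] [LawfulBEq κ] (d : PySem.Dict κ ν) (k : κ) (e v : ν) :
    (d.setdefault k e).insert k v = d.insert k v := by
  by_cases h : d.contains k
  · rw [PySem.Dict.setdefault_of_contains _ _ h]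
  · rw [PySem.Dict.setdefault_of_not_contains _ _ (by simpa using h),
      PySem.Dict.insert_insert_self]

lemma portA_eq (dm : List (List (String × String))) :
    calculate_confusion_matrices_py dm = pvToOut ((dm.map pvTri).foldl pvF0 PySem.Dict.empty) := by
  unfold calculate_confusion_matrices_py pvToOut
  rw [List.foldl_map]
  dsimp only
  congr 2
  apply List.foldl_ext
  intro cm m _
  simp only [pvF0, pvF1, pvF2, pvTri, cond_insert_getD, cond_insert_insert]

lemma portB_eq (dm : List (List (String × String))) :
    calculate_confusion_matrices_py_alt dm
      = pvToOut ((PySem.Dict.counter (dm.map pvTri)).items.foldl pvG0 PySem.Dict.empty) := by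
  unfold calculate_confusion_matrices_py_alt pvToOut
  dsimp only
  have hc : dm.foldl (fun d m =>
      d.insert (pvLookup m "field_name", pvLookup m "ground_truth_value", pvLookup m "predicted_value")
        (d.getD (pvLookup m "field_name", pvLookup m "ground_truth_value", pvLookup m "predicted_value") 0 + 1))
      PySem.Dict.empty = PySem.Dict.counter (dm.map pvTri) := by
    rw [← PySem.Dict.foldl_insert_getD_add_one_eq_counter, List.foldl_map]
    rfl
  rw [hc]
  congr 2
  apply List.foldl_ext
  intro r x _
  simp only [pvG0, pvG1, PySem.Dict.getD_setdefault_self, setdefault_insert]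

lemma foldl_insert_group {κ β ν : Type} [BEq κ] [LawfulBEq κ] (key : β → κ) (F : ν → β → ν)
    (e : ν) (l : List β) (d : PySem.Dict κ ν) (k : κ) :
    (l.foldl (fun d x => d.insert (key x) (F (d.getD (key x) e) x)) d).getD k e
      = (l.filter (fun x => key x == k)).foldl F (d.getD k e) := by
  induction l generalizing d with
  | nil => rfl
  | cons x l ih =>
    simp only [List.foldl_cons, List.filter_cons]
    rw [ih]
    by_cases h : key x = k
    · subst h
      simp [PySem.Dict.getD_insert_self]
    · have hne : k ≠ key x := fun hk => h hk.symm
      rw [PySem.Dict.getD_insert_of_ne (hne := hne)]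
      simp [h]

lemma set_map_append_singleton {α β : Type} [BEq α] [BEq β] (f : α → β) (s : List α) (x : α) :
    (s ++ [x]).map f = s.map f ++ [f x] := by
  simp

lemma set_ofList_map_ofList {α β : Type} [BEq α] [LawfulBEq α] [BEq β] [LawfulBEq β]
    (f : α → β) (l : List α) :
    PySem.Set.ofList ((PySem.Set.ofList l).map f) = PySem.Set.ofList (l.map f) := by
  induction l using List.reverseRecOn with
  | nil => rfl
  | append_singleton l x ih =>
    rw [set_map_append_singleton, PySem.Set.ofList_append_singleton,
      PySem.Set.ofList_append_singleton, PySem.Set.add_eq_ite]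
    by_cases hx : x ∈ PySem.Set.ofList l
    · have hfx : f x ∈ PySem.Set.ofList (l.map f) := by
        rw [PySem.Set.mem_ofList] at hx ⊢
        exact List.mem_map_of_mem hx
      rw [if_pos hx, ih, PySem.Set.add_of_mem hfx]
    · rw [if_neg hx, set_map_append_singleton, PySem.Set.ofList_append_singleton, ih]

lemma set_ofList_filter {α : Type} [BEq α] [LawfulBEq α] (p : α → Bool) (l : List α) :
    (PySem.Set.ofList l).filter p = PySem.Set.ofList (l.filter p) := by
  induction l using List.reverseRecOn with
  | nil => rfl
  | append_singleton l x ih =>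
    rw [PySem.Set.ofList_append_singleton, PySem.Set.add_eq_ite, List.filter_append]
    by_cases hx : x ∈ PySem.Set.ofList l
    · rw [if_pos hx, ih]
      by_cases hp : p x
      · have : x ∈ PySem.Set.ofList (l.filter p) := by
          rw [PySem.Set.mem_ofList] at hx ⊢
          exact List.mem_filter.mpr ⟨hx, hp⟩
        simp [hp, PySem.Set.ofList_append_singleton, PySem.Set.add_of_mem this]
      · simp [hp]
    · rw [if_neg hx, List.filter_append, ih]
      by_cases hp : p x
      · have hnx : x ∉ PySem.Set.ofList (l.filter p) := by
          rw [PySem.Set.mem_ofList] at hx ⊢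
          exact fun hm => hx (List.mem_filter.mp hm).1
        simp [hp, PySem.Set.ofList_append_singleton, PySem.Set.add_of_not_mem hnx]
      · simp [hp]

lemma set_ofList_map_injOn {α β : Type} [BEq α] [LawfulBEq α] [BEq β] [LawfulBEq β]
    (f : α → β) (l : List α) (h : ∀ x ∈ l, ∀ y ∈ l, f x = f y → x = y) :
    PySem.Set.ofList (l.map f) = (PySem.Set.ofList l).map f := by
  induction l using List.reverseRecOn with
  | nil => rfl
  | append_singleton l x ih =>
    have h' : ∀ a ∈ l, ∀ b ∈ l, f a = f b → a = b := fun a ha b hb =>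
      h a (by simp [ha]) b (by simp [hb])
    rw [set_map_append_singleton, PySem.Set.ofList_append_singleton,
      PySem.Set.ofList_append_singleton, ih h', PySem.Set.add_eq_ite, PySem.Set.add_eq_ite]
    by_cases hx : x ∈ PySem.Set.ofList l
    · have hfx : f x ∈ (PySem.Set.ofList l).map f := by
        exact List.mem_map_of_mem hx
      rw [if_pos hfx, if_pos hx]
    · have hfx : f x ∉ (PySem.Set.ofList l).map f := by
        intro hm
        obtain ⟨y, hy, hfy⟩ := List.mem_map.mp hm
        rw [PySem.Set.mem_ofList] at hy hx
        exact hx (h y (by simp [hy]) x (by simp) hfy ▸ hy)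
      rw [if_neg hfx, if_neg hx, set_map_append_singleton]

lemma count_map_injOn {α β : Type} [BEq α] [LawfulBEq α] [BEq β] [LawfulBEq β]
    (f : α → β) (l : List α) (a : α) (h : ∀ x ∈ l, f x = f a → x = a) :
    (l.map f).count (f a) = l.count a := by
  induction l with
  | nil => rfl
  | cons x l ih =>
    have h' : ∀ y ∈ l, f y = f a → y = a := fun y hy => h y (List.mem_cons_of_mem _ hy)
    simp only [List.map_cons, List.count_cons, ih h']
    by_cases hx : x = a
    · subst hx; simp
    · have : ¬(f x = f a) := fun hf => hx (h x List.mem_cons_self hf)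
      simp [hx, this]

-- A's nested dict at field f, then at gt g, is the counter of the matching predicted values
lemma A2_eq (ts : List (String × String × String)) (f g : String) :
    (((ts.foldl pvF0 PySem.Dict.empty).getD f PySem.Dict.empty).getD g PySem.Dict.empty)
      = PySem.Dict.counter ((ts.filter (fun t => t.2.1 == g && t.1 == f)).map (fun t => t.2.2)) := by
  have h0 : (ts.foldl pvF0 PySem.Dict.empty).getD f PySem.Dict.empty
      = ((ts.filter (fun t => t.1 == f)).map (fun t => t.2)).foldl pvF1 PySem.Dict.empty := by
    have h := foldl_insert_group (fun t : String × String × String => t.1)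
      (fun d1 t => pvF1 d1 t.2) PySem.Dict.empty ts PySem.Dict.empty f
    simp only [PySem.Dict.getD_empty] at h
    rw [List.foldl_map]
    exact h
  rw [h0]
  have h1 := foldl_insert_group (fun gp : String × String => gp.1)
    (fun d2 gp => pvF2 d2 gp.2) PySem.Dict.empty
    ((ts.filter (fun t => t.1 == f)).map (fun t => t.2)) PySem.Dict.empty g
  simp only [PySem.Dict.getD_empty] at h1
  have h1' : (((ts.filter (fun t => t.1 == f)).map (fun t => t.2)).foldl pvF1 PySem.Dict.empty).getD g PySem.Dict.empty
      = (((ts.filter (fun t => t.1 == f)).map (fun t => t.2)).filter (fun gp => gp.1 == g)).foldl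
          (fun d2 gp => pvF2 d2 gp.2) PySem.Dict.empty := h1
  rw [h1', List.filter_map, List.filter_filter, List.foldl_map]
  have h2 : ((ts.filter (fun t => t.2.1 == g && t.1 == f)).map (fun t => t.2.2)).foldl pvF2 PySem.Dict.empty
      = PySem.Dict.counter ((ts.filter (fun t => t.2.1 == g && t.1 == f)).map (fun t => t.2.2)) :=
    PySem.Dict.foldl_insert_getD_add_one_eq_counter _
  rw [← h2, List.foldl_map]
  rfl

lemma pv_trip_inj {f g : String} {x y : String × String × String}
    (hx : (x.2.1 == g && x.1 == f) = true) (hy : (y.2.1 == g && y.1 == f) = true)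
    (h : x.2.2 = y.2.2) : x = y := by
  obtain ⟨a, b, c⟩ := x
  obtain ⟨a', b', c'⟩ := y
  simp only [Bool.and_eq_true, beq_iff_eq] at hx hy
  simp_all

lemma A1_eq (ts : List (String × String × String)) (f : String) :
    (ts.foldl pvF0 PySem.Dict.empty).getD f PySem.Dict.empty
      = ((ts.filter (fun t => t.1 == f)).map (fun t => t.2)).foldl pvF1 PySem.Dict.empty := by
  have h := foldl_insert_group (fun t : String × String × String => t.1)
    (fun d1 t => pvF1 d1 t.2) PySem.Dict.empty ts PySem.Dict.empty f
  simp only [PySem.Dict.getD_empty] at h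
  rw [List.foldl_map]
  exact h

lemma B1_eq (ys : List ((String × String × String) × Int)) (f : String) :
    (ys.foldl pvG0 PySem.Dict.empty).getD f PySem.Dict.empty
      = (ys.filter (fun x => x.1.1 == f)).foldl pvG1 PySem.Dict.empty := by
  have h := foldl_insert_group (fun x : (String × String × String) × Int => x.1.1)
    pvG1 PySem.Dict.empty ys PySem.Dict.empty f
  simp only [PySem.Dict.getD_empty] at h
  exact h

lemma A2_items (ts : List (String × String × String)) (f g : String) :
    ((((ts.foldl pvF0 PySem.Dict.empty).getD f PySem.Dict.empty).getD g PySem.Dict.empty)).items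
      = (((PySem.Set.ofList ts).filter (fun t => t.2.1 == g && t.1 == f)).map
          (fun t => (t.2.2, (List.count t ts : Int)))) := by
  rw [A2_eq, PySem.Dict.items_counter]
  have hinj : ∀ x ∈ ts.filter (fun t => t.2.1 == g && t.1 == f),
      ∀ y ∈ ts.filter (fun t => t.2.1 == g && t.1 == f),
      x.2.2 = y.2.2 → x = y := by
    intro x hx y hy h
    exact pv_trip_inj (List.mem_filter.mp hx).2 (List.mem_filter.mp hy).2 h
  rw [set_ofList_map_injOn _ _ hinj, ← set_ofList_filter, List.map_map]
  apply List.map_congr_left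
  intro t ht
  have htf : t ∈ ts.filter (fun t => t.2.1 == g && t.1 == f) := by
    rw [set_ofList_filter] at ht
    exact (PySem.Set.mem_ofList _ _).mp ht
  have hpred := (List.mem_filter.mp htf).2
  have hcnt : ((ts.filter (fun t => t.2.1 == g && t.1 == f)).map (fun t => t.2.2)).count t.2.2
      = List.count t ts := by
    have h1 := count_map_injOn (fun t : String × String × String => t.2.2)
      (ts.filter (fun t => t.2.1 == g && t.1 == f)) t
      (fun x hx hfx => pv_trip_inj (List.mem_filter.mp hx).2 hpred hfx)
    have h2 := List.count_filter (l := ts) (p := fun t => t.2.1 == g && t.1 == f) (a := t) (by exact hpred)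
    rw [h1, h2]
  simp only [Function.comp_apply, hcnt]

lemma B2_items (ts : List (String × String × String)) (f g : String) :
    ((((PySem.Dict.counter ts).items.foldl pvG0 PySem.Dict.empty).getD f
        PySem.Dict.empty).getD g PySem.Dict.empty).items
      = (((PySem.Set.ofList ts).filter (fun t => t.2.1 == g && t.1 == f)).map
          (fun t => (t.2.2, (List.count t ts : Int)))) := by
  rw [B1_eq]
  have h1 := foldl_insert_group (fun x : (String × String × String) × Int => x.1.2.1)
    (fun d2 x => d2.insert x.1.2.2 x.2) PySem.Dict.empty
    ((PySem.Dict.counter ts).items.filter (fun x => x.1.1 == f)) PySem.Dict.empty g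
  simp only [PySem.Dict.getD_empty] at h1
  have h1' : (((PySem.Dict.counter ts).items.filter (fun x => x.1.1 == f)).foldl pvG1
      PySem.Dict.empty).getD g PySem.Dict.empty
      = ((((PySem.Dict.counter ts).items.filter (fun x => x.1.1 == f)).filter
          (fun x => x.1.2.1 == g)).foldl (fun d2 x => d2.insert x.1.2.2 x.2)
          PySem.Dict.empty) := h1
  rw [h1', List.filter_filter, PySem.Dict.items_counter, List.filter_map]
  have hcomp : ((fun x : (String × String × String) × Int => x.1.2.1 == g && x.1.1 == f) ∘
      (fun k : String × String × String => (k, (List.count k ts : Int))))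
      = fun t : String × String × String => t.2.1 == g && t.1 == f := rfl
  rw [hcomp, List.foldl_map]
  have hfresh := PySem.Dict.items_foldl_insert_fresh
    ((PySem.Set.ofList ts).filter (fun t => t.2.1 == g && t.1 == f))
    (fun t : String × String × String => t.2.2)
    (fun t : String × String × String => (List.count t ts : Int))
    PySem.Dict.empty
    (fun a _ => PySem.Dict.contains_empty _)
    (by
      apply List.Nodup.map_on
      · intro x hx y hy h
        exact pv_trip_inj (List.mem_filter.mp hx).2 (List.mem_filter.mp hy).2 h
      · exact (PySem.Set.nodup_ofList _).filter _)
  rw [hfresh]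
  rfl

lemma level2_eq (ts : List (String × String × String)) (f g : String) :
    ((ts.foldl pvF0 PySem.Dict.empty).getD f PySem.Dict.empty).getD g PySem.Dict.empty
      = (((PySem.Dict.counter ts).items.foldl pvG0 PySem.Dict.empty).getD f
          PySem.Dict.empty).getD g PySem.Dict.empty :=
  PySem.Dict.ext ((A2_items ts f g).trans (B2_items ts f g).symm)

lemma A1_keys (ts : List (String × String × String)) (f : String) :
    ((ts.foldl pvF0 PySem.Dict.empty).getD f PySem.Dict.empty).keys
      = PySem.Set.ofList ((ts.filter (fun t => t.1 == f)).map (fun t => t.2.1)) := by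
  rw [A1_eq]
  have h := PySem.Dict.keys_foldl_insert_key
    ((ts.filter (fun t => t.1 == f)).map (fun t => t.2))
    (fun gp : String × String => gp.1)
    (fun d gp => pvF2 (d.getD gp.1 PySem.Dict.empty) gp.2) PySem.Dict.empty
  have h' : (((ts.filter (fun t => t.1 == f)).map (fun t => t.2)).foldl pvF1
      PySem.Dict.empty).keys
      = PySem.Set.update PySem.Dict.empty.keys
          (((ts.filter (fun t => t.1 == f)).map (fun t => t.2)).map (fun gp => gp.1)) := h
  rw [h', List.map_map]
  exact PySem.Set.update_nil_left _

lemma A1_nodup (ts : List (String × String × String)) (f : String) :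
    ((ts.foldl pvF0 PySem.Dict.empty).getD f PySem.Dict.empty).keys.Nodup := by
  rw [A1_eq]
  exact PySem.Dict.nodup_keys_foldl_insert_key _ (fun gp : String × String => gp.1)
    (fun d gp => pvF2 (d.getD gp.1 PySem.Dict.empty) gp.2) PySem.Dict.empty (by simp)

lemma B1_keys (ts : List (String × String × String)) (f : String) :
    (((PySem.Dict.counter ts).items.foldl pvG0 PySem.Dict.empty).getD f PySem.Dict.empty).keys
      = PySem.Set.ofList ((ts.filter (fun t => t.1 == f)).map (fun t => t.2.1)) := by
  rw [B1_eq]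
  have h := PySem.Dict.keys_foldl_insert_key
    ((PySem.Dict.counter ts).items.filter (fun x => x.1.1 == f))
    (fun x : (String × String × String) × Int => x.1.2.1)
    (fun d x => (d.getD x.1.2.1 PySem.Dict.empty).insert x.1.2.2 x.2) PySem.Dict.empty
  have h' : (((PySem.Dict.counter ts).items.filter (fun x => x.1.1 == f)).foldl pvG1
      PySem.Dict.empty).keys
      = PySem.Set.update PySem.Dict.empty.keys
          (((PySem.Dict.counter ts).items.filter (fun x => x.1.1 == f)).map
            (fun x => x.1.2.1)) := h
  rw [h', PySem.Dict.items_counter, List.filter_map]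
  have hcomp : ((fun x : (String × String × String) × Int => x.1.1 == f) ∘
      (fun k : String × String × String => (k, (List.count k ts : Int))))
      = fun t : String × String × String => t.1 == f := rfl
  rw [hcomp, List.map_map]
  have hmap : ((fun x : (String × String × String) × Int => x.1.2.1) ∘
      (fun k : String × String × String => (k, (List.count k ts : Int))))
      = fun t : String × String × String => t.2.1 := rfl
  rw [hmap, set_ofList_filter]
  have := set_ofList_map_ofList (fun t : String × String × String => t.2.1)
    (ts.filter (fun t => t.1 == f))
  rw [PySem.Dict.keys_empty, PySem.Set.update_nil_left, this]

lemma B1_nodup (ts : List (String × String × String)) (f : String) :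
    (((PySem.Dict.counter ts).items.foldl pvG0 PySem.Dict.empty).getD f
      PySem.Dict.empty).keys.Nodup := by
  rw [B1_eq]
  exact PySem.Dict.nodup_keys_foldl_insert_key _
    (fun x : (String × String × String) × Int => x.1.2.1)
    (fun d x => (d.getD x.1.2.1 PySem.Dict.empty).insert x.1.2.2 x.2) PySem.Dict.empty (by simp)

lemma level1_eq (ts : List (String × String × String)) (f : String) :
    (ts.foldl pvF0 PySem.Dict.empty).getD f PySem.Dict.empty
      = ((PySem.Dict.counter ts).items.foldl pvG0 PySem.Dict.empty).getD f PySem.Dict.empty := by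
  apply PySem.Dict.ext
  rw [PySem.Dict.items_eq_map_keys _ (A1_nodup ts f) PySem.Dict.empty,
    PySem.Dict.items_eq_map_keys _ (B1_nodup ts f) PySem.Dict.empty, A1_keys, B1_keys]
  apply List.map_congr_left
  intro g _
  rw [level2_eq]

lemma A0_keys (ts : List (String × String × String)) :
    (ts.foldl pvF0 PySem.Dict.empty).keys = PySem.Set.ofList (ts.map (fun t => t.1)) := by
  have h := PySem.Dict.keys_foldl_insert_key ts
    (fun t : String × String × String => t.1)
    (fun d t => pvF1 (d.getD t.1 PySem.Dict.empty) t.2) PySem.Dict.empty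
  have h' : (ts.foldl pvF0 PySem.Dict.empty).keys
      = PySem.Set.update PySem.Dict.empty.keys (ts.map (fun t => t.1)) := h
  rw [h']
  exact PySem.Set.update_nil_left _

lemma A0_nodup (ts : List (String × String × String)) :
    (ts.foldl pvF0 PySem.Dict.empty).keys.Nodup :=
  PySem.Dict.nodup_keys_foldl_insert_key ts (fun t : String × String × String => t.1)
    (fun d t => pvF1 (d.getD t.1 PySem.Dict.empty) t.2) PySem.Dict.empty (by simp)

lemma B0_keys (ts : List (String × String × String)) :
    ((PySem.Dict.counter ts).items.foldl pvG0 PySem.Dict.empty).keys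
      = PySem.Set.ofList (ts.map (fun t => t.1)) := by
  have h := PySem.Dict.keys_foldl_insert_key (PySem.Dict.counter ts).items
    (fun x : (String × String × String) × Int => x.1.1)
    (fun d x => pvG1 (d.getD x.1.1 PySem.Dict.empty) x) PySem.Dict.empty
  have h' : ((PySem.Dict.counter ts).items.foldl pvG0 PySem.Dict.empty).keys
      = PySem.Set.update PySem.Dict.empty.keys
          ((PySem.Dict.counter ts).items.map (fun x => x.1.1)) := h
  rw [h', PySem.Dict.items_counter, List.map_map]
  have hmap : ((fun x : (String × String × String) × Int => x.1.1) ∘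
      (fun k : String × String × String => (k, (List.count k ts : Int))))
      = fun t : String × String × String => t.1 := rfl
  rw [hmap, PySem.Dict.keys_empty, PySem.Set.update_nil_left]
  exact set_ofList_map_ofList (fun t : String × String × String => t.1) ts

lemma B0_nodup (ts : List (String × String × String)) :
    ((PySem.Dict.counter ts).items.foldl pvG0 PySem.Dict.empty).keys.Nodup :=
  PySem.Dict.nodup_keys_foldl_insert_key _
    (fun x : (String × String × String) × Int => x.1.1)
    (fun d x => pvG1 (d.getD x.1.1 PySem.Dict.empty) x) PySem.Dict.empty (by simp)

lemma main_eq (ts : List (String × String × String)) :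
    ts.foldl pvF0 PySem.Dict.empty
      = (PySem.Dict.counter ts).items.foldl pvG0 PySem.Dict.empty := by
  apply PySem.Dict.ext
  rw [PySem.Dict.items_eq_map_keys _ (A0_nodup ts) PySem.Dict.empty,
    PySem.Dict.items_eq_map_keys _ (B0_nodup ts) PySem.Dict.empty, A0_keys, B0_keys]
  apply List.map_congr_left
  intro f _
  rw [level1_eq]

-- ===== VERDICT (by name: the statement is the Claim_ definition above) =====
theorem calculate_confusion_matrices_py_spec : Claim_equal_calculate_confusion_matrices_py := by
  intro dm _ _
  unfold Spec_calculate_confusion_matrices_py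
  rw [portA_eq, portB_eq, main_eq]
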